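-- pv_equiv track=rewrite | github.com/larynx95/rosalind | src/ba05/ba05d_longest_path/ba05d_all_paths_02.py | paths4
-- ===== SOURCE A (Python) =====
-- def paths4(graph, start):
--     if start not in graph:
--         return [[start]]
--     paths = []
--     for v in graph[start]:
--         for v_path in paths4(graph, v):
--             paths.append([start] + v_path)
--     return paths
-- ===== SOURCE B (Python) =====
-- def paths4(graph, start):
--     # Top-down: carry the prefix built so far; a leaf returns the finished path once,
--     # comprehensions concatenate the children's results.
--     def go(prefix, node):
--         prefix = prefix + [node]
--         if node in graph:
--             return [p for v in graph[node] for p in go(prefix, v)]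
--         return [prefix]
--     return go([], start)
-- ===== Notes on version B (the rewrite author's own statement) =====
-- stated objective: alternative
-- what changed: A builds paths bottom-up, re-prefixing [start]+v_path over every returned path at every recursion level with nested append loops; B passes the accumulated prefix top-down, each leaf emits its finished path once and comprehensions concatenate the children's results.
import Mathlib
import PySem

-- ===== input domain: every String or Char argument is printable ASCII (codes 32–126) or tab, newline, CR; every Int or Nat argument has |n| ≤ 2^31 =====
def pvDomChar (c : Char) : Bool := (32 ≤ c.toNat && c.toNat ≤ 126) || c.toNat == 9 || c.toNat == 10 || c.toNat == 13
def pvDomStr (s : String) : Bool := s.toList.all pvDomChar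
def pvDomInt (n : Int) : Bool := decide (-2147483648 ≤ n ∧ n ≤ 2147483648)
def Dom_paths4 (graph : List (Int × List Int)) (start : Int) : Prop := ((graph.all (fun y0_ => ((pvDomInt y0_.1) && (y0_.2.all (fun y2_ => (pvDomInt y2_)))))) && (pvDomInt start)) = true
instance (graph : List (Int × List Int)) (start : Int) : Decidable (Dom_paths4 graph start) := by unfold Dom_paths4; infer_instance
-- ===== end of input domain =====

-- B replaces A's bottom-up per-level path rebuilding ([start]+v_path at every recursion level) by a
-- top-down recursion passing the accumulated prefix, each leaf emitting its path once (objective: alternative).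


-- ===== PORT A =====
-- A's dict test/lookup 'start in graph' / 'graph[start]' (first match; dicts have unique keys)
def pvLookup (graph : List (Int × List Int)) (k : Int) : Option (List Int) :=
  match graph with
  | [] => none
  | (a, vs) :: rest => if a = k then some vs else pvLookup rest k

-- A's recursion, fuel-bounded for totality: fuel graph.length+1 suffices on every acyclic graph
-- (each recursive level consumes a distinct key); cyclic graphs are outside Pre_paths4.
def paths4Fuel (graph : List (Int × List Int)) (fuel : Nat) (start : Int) : List (List Int) :=
  match fuel with
  | 0 => []
  | fuel + 1 =>
    match pvLookup graph start with
    | none => [[start]]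
    | some vs =>
      vs.foldl (fun paths v =>
        (paths4Fuel graph fuel v).foldl (fun paths vPath => paths ++ [start :: vPath]) paths) []

def paths4 (graph : List (Int × List Int)) (start : Int) : List (List Int) :=
  paths4Fuel graph (graph.length + 1) start

-- ===== PORT B =====
-- Source B's go(prefix, node): extend the prefix, then either recurse into the children
-- (the comprehension = flatMap) or emit the finished path; same fuel bound for totality.
def goB (graph : List (Int × List Int)) (fuel : Nat) (pfx : List Int) (node : Int) : List (List Int) :=
  match fuel with
  | 0 => []
  | fuel + 1 =>
    let pfx := pfx ++ [node]
    match List.lookup node graph with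
    | some vs => vs.flatMap (goB graph fuel pfx)
    | none => [pfx]

def paths4_alt (graph : List (Int × List Int)) (start : Int) : List (List Int) :=
  goB graph (graph.length + 1) [] start

-- ===== PRECONDITION & SPEC =====
def pvHasEdge (graph : List (Int × List Int)) (a b : Int) : Bool :=
  graph.any fun kv => kv.1 = a && kv.2.contains b

def pvIns (x : Int) : List Int → List (List Int)
  | [] => [[x]]
  | y :: ys => (x :: y :: ys) :: (pvIns x ys).map (y :: ·)

def pvPerms : List Int → List (List Int)
  | [] => [[]]
  | x :: xs => (pvPerms xs).flatMap (pvIns x)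

def pvIsCycle (graph : List (Int × List Int)) (l : List Int) : Bool :=
  !l.isEmpty && (l.zip (l.rotate 1)).all fun p => pvHasEdge graph p.1 p.2

-- candidate node sequences: every list of distinct keys
def pvCands (graph : List (Int × List Int)) : List (List Int) :=
  (graph.map Prod.fst).dedup.sublists.flatMap pvPerms

def pvChain (graph : List (Int × List Int)) : List Int → Bool
  | a :: b :: rest => pvHasEdge graph a b && pvChain graph (b :: rest)
  | _ => true

-- n is reachable from start (n = start, or a simple edge-path of distinct keys leads start → n)
def pvReach (graph : List (Int × List Int)) (start n : Int) : Bool :=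
  (n == start) || (pvCands graph).any fun p =>
    match p with
    | [] => false
    | a :: _ => a == start && p.getLast! == n && pvChain graph p

-- Pre_ excludes exactly the graphs with a directed cycle reachable from start: there the Python
-- recursion never terminates (RecursionError).
def Pre_paths4 (graph : List (Int × List Int)) (start : Int) : Prop :=
  ∀ l ∈ pvCands graph, pvIsCycle graph l = true → pvReach graph start l.head! = false

instance (graph : List (Int × List Int)) (start : Int) : Decidable (Pre_paths4 graph start) := by
  unfold Pre_paths4; infer_instance

def pvWitness_paths4 : (List (Int × List Int)) × Int := ([(0, [1, 2]), (1, [2])], 0)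

def Spec_paths4 (graph : List (Int × List Int)) (start : Int) (out : List (List Int)) : Prop := out = paths4_alt graph start
instance (graph : List (Int × List Int)) (start : Int) (out : List (List Int)) : Decidable (Spec_paths4 graph start out) := by unfold Spec_paths4; infer_instance

-- ===== CLAIM (what is proved, stated in full; the proofs are below) =====
def Claim_equal_paths4 : Prop := ∀ (graph : List (Int × List Int)) (start : Int), Dom_paths4 graph start → Pre_paths4 graph start → Spec_paths4 graph start (paths4 graph start)

-- ===== LEMMAS AND PROOFS =====

-- the two dict lookups agree
theorem lookup_eq_pvLookup (graph : List (Int × List Int)) (k : Int) :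
    List.lookup k graph = pvLookup graph k := by
  induction graph with
  | nil => rfl
  | cons kv rest ih =>
    obtain ⟨a, vs⟩ := kv
    by_cases h : a = k
    · simp [List.lookup, pvLookup, h]
    · have hk : (k == a) = false := by
        simpa using fun hka => h hka.symm
      simp [List.lookup, pvLookup, h, hk, ih]

-- A's inner double loop, flattened: the foldl-append accumulation is the flatMap of the maps.
theorem paths4Fuel_succ_some (graph : List (Int × List Int)) (fuel : Nat) (start : Int)
    (vs : List Int) (h : pvLookup graph start = some vs) :
    paths4Fuel graph (fuel + 1) start
      = vs.flatMap (fun v => (paths4Fuel graph fuel v).map (fun p => start :: p)) := by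
  show (match pvLookup graph start with
    | none => [[start]]
    | some vs =>
      vs.foldl (fun paths v =>
        (paths4Fuel graph fuel v).foldl (fun paths vPath => paths ++ [start :: vPath]) paths) [])
    = _
  rw [h]
  have inner : ∀ (ps : List (List Int)) (init : List (List Int)),
      ps.foldl (fun paths vPath => paths ++ [start :: vPath]) init
        = init ++ ps.map (fun p => start :: p) := by
    intro ps
    induction ps with
    | nil => simp
    | cons p ps ih => intro init; simp [List.foldl, ih]
  have outer : ∀ (ws : List Int) (init : List (List Int)),
      ws.foldl (fun paths v =>
          (paths4Fuel graph fuel v).foldl (fun paths vPath => paths ++ [start :: vPath]) paths) init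
        = init ++ ws.flatMap (fun v => (paths4Fuel graph fuel v).map (fun p => start :: p)) := by
    intro ws
    induction ws with
    | nil => simp
    | cons w ws ih => intro init; simp only [List.foldl]; rw [inner, ih]; simp
  simpa using outer vs []

-- Key invariant: B's top-down recursion computes A's paths prefixed with the accumulated prefix.
theorem goB_eq (graph : List (Int × List Int)) (fuel : Nat) :
    ∀ (pfx : List Int) (node : Int),
      goB graph fuel pfx node = (paths4Fuel graph fuel node).map (fun p => pfx ++ p) := by
  induction fuel with
  | zero => intro pfx node; simp [goB, paths4Fuel]
  | succ fuel ih =>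
    intro pfx node
    cases h : pvLookup graph node with
    | none =>
      simp [goB, paths4Fuel, lookup_eq_pvLookup, h]
    | some vs =>
      rw [paths4Fuel_succ_some graph fuel node vs h]
      simp only [goB, lookup_eq_pvLookup, h]
      rw [List.map_flatMap]
      apply List.flatMap_congr
      intro v _
      rw [ih]
      simp [Function.comp]

-- ===== VERDICT (by name: the statement is the Claim_ definition above) =====
theorem paths4_spec : Claim_equal_paths4 := by
  intro graph start _ _
  show paths4 graph start = paths4_alt graph start
  unfold paths4 paths4_alt
  rw [goB_eq]
  simp
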